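-- pv_equiv track=rewrite | github.com/Pakopac/codesignal | matrixElementsSum.py | matrixElementsSum
-- ===== SOURCE A (Python) =====
-- def matrixElementsSum(matrix):
--     s = 0
--     hauntedID = []
--     for row in matrix:
--         for i in range(len(row)):
--             if row[i] == 0:
--                 hauntedID.append(i)
--             elif i not in hauntedID:
--                 s = s + row[i]
--     return s
-- ===== SOURCE B (Python) =====
-- def matrixElementsSum(matrix):
--     width = max((len(r) for r in matrix), default=0)
--     total = 0
--     for j in range(width):
--         for row in matrix:
--             if j < len(row):
--                 if row[j] == 0:
--                     break
--                 total += row[j]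
--     return total
-- ===== Notes on version B (the rewrite author's own statement) =====
-- stated objective: alternative
-- what changed: Column-major traversal with early break at the first zero in each column replaces A's row-major sweep that maintains a growing haunted-index list with a linear membership test per cell.
import Mathlib
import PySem

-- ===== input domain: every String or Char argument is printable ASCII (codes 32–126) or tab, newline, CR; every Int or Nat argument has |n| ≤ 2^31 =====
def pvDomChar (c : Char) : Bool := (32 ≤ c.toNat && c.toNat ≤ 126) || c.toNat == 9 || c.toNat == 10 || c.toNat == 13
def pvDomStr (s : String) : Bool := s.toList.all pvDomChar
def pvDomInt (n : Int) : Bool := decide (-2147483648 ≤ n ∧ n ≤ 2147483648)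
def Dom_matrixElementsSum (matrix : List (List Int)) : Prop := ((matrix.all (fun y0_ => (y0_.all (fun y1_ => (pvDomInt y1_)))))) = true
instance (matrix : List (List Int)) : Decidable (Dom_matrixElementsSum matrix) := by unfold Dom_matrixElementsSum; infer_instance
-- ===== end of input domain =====

-- B replaces A's row-major sweep with a haunted-index list by a column-major walk that
-- stops at the first zero in each column (alternative algorithm, same results).

-- ===== PORT A =====
-- for row in matrix: for i in range(len(row)): if row[i]==0 append i; elif i not in haunted: s += row[i]
def matrixElementsSum (matrix : List (List Int)) : Int :=
  (matrix.foldl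
    (fun (st : Int × List Nat) row =>
      (List.range row.length).foldl
        (fun (st : Int × List Nat) i =>
          if row.getD i 0 = 0 then (st.1, st.2 ++ [i])
          else if i ∈ st.2 then st
          else (st.1 + row.getD i 0, st.2))
        st)
    (0, [])).1

-- ===== PORT B =====
-- inner 'for row in matrix: if j < len(row): if row[j]==0: break; total += row[j]'
def pvColWalk (j : Nat) : List (List Int) → Int
  | [] => 0
  | r :: rs =>
    match r[j]? with
    | none => pvColWalk j rs
    | some v => if v = 0 then 0 else v + pvColWalk j rs

def matrixElementsSum_alt (matrix : List (List Int)) : Int :=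
  let width := matrix.foldl (fun w r => max w r.length) 0
  (List.range width).foldl (fun t j => t + pvColWalk j matrix) 0

-- ===== PRECONDITION & SPEC =====
def Spec_matrixElementsSum (matrix : List (List Int)) (out : Int) : Prop := out = matrixElementsSum_alt matrix
instance (matrix : List (List Int)) (out : Int) : Decidable (Spec_matrixElementsSum matrix out) := by unfold Spec_matrixElementsSum; infer_instance

-- ===== CLAIM (what is proved, stated in full; the proofs are below) =====
def Claim_equal_matrixElementsSum : Prop := ∀ (matrix : List (List Int)), Dom_matrixElementsSum matrix → Spec_matrixElementsSum matrix (matrixElementsSum matrix)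

-- ===== LEMMAS AND PROOFS =====

-- value A adds for cell (row r, column j) given the haunted list h at the start of the row
def pvCell (r : List Int) (h : List Nat) (j : Nat) : Int :=
  match r[j]? with
  | none => 0
  | some v => if v = 0 ∨ j ∈ h then 0 else v

-- indices (below n) of zero entries of r, in order: what A appends to haunted for row r
def pvZIdx (r : List Int) (n : Nat) : List Nat :=
  (List.range n).filter (fun j => decide (r.getD j 0 = 0))

-- column walk, but a haunted column contributes 0
def pvColWalkH (j : Nat) (h : List Nat) (rows : List (List Int)) : Int :=
  if j ∈ h then 0 else pvColWalk j rows

theorem pv_foldl_add (F : Nat → Int) (l : List Nat) (t : Int) :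
    l.foldl (fun t j => t + F j) t = t + (l.map F).sum := by
  induction l generalizing t with
  | nil => simp
  | cons x xs ih => simp [List.foldl_cons, ih]; ring

theorem pv_sum_map_add (f g : Nat → Int) (l : List Nat) :
    (l.map (fun j => f j + g j)).sum = (l.map f).sum + (l.map g).sum := by
  induction l with
  | nil => simp
  | cons x xs ih => simp [ih]; ring

theorem pv_mem_zidx (r : List Int) (n j : Nat) :
    j ∈ pvZIdx r n ↔ j < n ∧ r.getD j 0 = 0 := by
  simp [pvZIdx, List.mem_filter, List.mem_range]

-- inner loop of A over one row
theorem pv_inner (r : List Int) (n : Nat) (hn : n ≤ r.length) (s : Int) (h : List Nat) :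
    (List.range n).foldl
        (fun (st : Int × List Nat) i =>
          if r.getD i 0 = 0 then (st.1, st.2 ++ [i])
          else if i ∈ st.2 then st
          else (st.1 + r.getD i 0, st.2))
        (s, h)
      = (s + ((List.range n).map (pvCell r h)).sum, h ++ pvZIdx r n) := by
  induction n with
  | zero => simp [pvZIdx]
  | succ n ih =>
    have hn' : n ≤ r.length := Nat.le_of_succ_le hn
    have hlt : n < r.length := hn
    obtain ⟨v, hget⟩ : ∃ v, r[n]? = some v := ⟨r[n], List.getElem?_eq_getElem hlt⟩
    have hgd : r.getD n 0 = v := by rw [List.getD_eq_getElem?_getD, hget]; rfl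
    have hz : pvZIdx r (n + 1) = pvZIdx r n ++ (if v = 0 then [n] else []) := by
      unfold pvZIdx
      rw [List.range_succ, List.filter_append, List.filter_cons, List.filter_nil, hgd]
      by_cases h0 : v = 0
      · rw [if_pos (decide_eq_true h0), if_pos h0]
      · rw [if_neg (by simpa using h0), if_neg h0]
    have hcell : pvCell r h n = (if v = 0 ∨ n ∈ h then 0 else v) := by
      unfold pvCell; rw [hget]
    have hmem : n ∈ h ++ pvZIdx r n ↔ n ∈ h := by
      constructor
      · intro hm
        rcases List.mem_append.mp hm with hm | hm
        · exact hm
        · exact absurd ((pv_mem_zidx r n n).mp hm).1 (lt_irrefl n)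
      · exact fun hm => List.mem_append.mpr (Or.inl hm)
    rw [List.range_succ, List.foldl_append, ih hn', List.foldl_cons, List.foldl_nil,
      List.map_append, List.sum_append, List.map_cons, List.map_nil, List.sum_cons,
      List.sum_nil, add_zero, hz, hcell, hgd]
    by_cases h0 : v = 0
    · simp [h0]
    · by_cases hh : n ∈ h
      · simp [h0, hmem, hh]
      · simp [h0, hmem, hh, add_assoc]

-- one column step: haunted-aware column walk through r :: rs
theorem pv_col_step (j : Nat) (h : List Nat) (r : List Int) (rs : List (List Int)) :
    pvColWalkH j h (r :: rs)
      = pvCell r h j + pvColWalkH j (h ++ pvZIdx r r.length) rs := by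
  by_cases hh : j ∈ h
  · have : j ∈ h ++ pvZIdx r r.length := List.mem_append.mpr (Or.inl hh)
    cases hj : r[j]? with
    | none => simp [pvColWalkH, hh, this, pvCell, hj]
    | some v => simp [pvColWalkH, hh, this, pvCell, hj]
  · cases hj : r[j]? with
    | none =>
      have hlen : ¬ j < r.length := by
        intro hlt
        rw [List.getElem?_eq_getElem hlt] at hj
        simp at hj
      have : ¬ j ∈ h ++ pvZIdx r r.length := by
        intro hm
        rcases List.mem_append.mp hm with hm | hm
        · exact hh hm
        · exact hlen ((pv_mem_zidx r r.length j).mp hm).1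
      simp [pvColWalkH, hh, this, pvColWalk, hj, pvCell]
    | some v =>
      have hlt : j < r.length := by
        by_contra hlen
        rw [List.getElem?_eq_none (Nat.le_of_not_lt hlen)] at hj
        simp at hj
      have hgd : r.getD j 0 = v := by
        simp [List.getD_eq_getElem?_getD, hj]
      by_cases h0 : v = 0
      · have : j ∈ h ++ pvZIdx r r.length :=
          List.mem_append.mpr (Or.inr ((pv_mem_zidx r r.length j).mpr ⟨hlt, by rw [hgd, h0]⟩))
        simp [pvColWalkH, hh, this, pvColWalk, hj, h0, pvCell]
      · have : ¬ j ∈ h ++ pvZIdx r r.length := by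
          intro hm
          rcases List.mem_append.mp hm with hm | hm
          · exact hh hm
          · exact h0 (by rw [← hgd]; exact ((pv_mem_zidx r r.length j).mp hm).2)
        simp [pvColWalkH, hh, this, pvColWalk, hj, h0, pvCell]

-- pvCell is 0 beyond the row, so its row-sum can be padded to any W ≥ r.length
theorem pv_cell_pad (r : List Int) (h : List Nat) (W : Nat) (hW : r.length ≤ W) :
    ((List.range W).map (pvCell r h)).sum = ((List.range r.length).map (pvCell r h)).sum := by
  induction W, hW using Nat.le_induction with
  | base => rfl
  | succ W hW ih =>
    rw [List.range_succ, List.map_append, List.sum_append, ih]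
    have : pvCell r h W = 0 := by
      simp [pvCell, List.getElem?_eq_none hW]
    simp [this]

-- main invariant for A's outer loop
theorem pv_outer (rows : List (List Int)) (W : Nat) (hW : ∀ r ∈ rows, r.length ≤ W)
    (s : Int) (h : List Nat) :
    (rows.foldl
      (fun (st : Int × List Nat) row =>
        (List.range row.length).foldl
          (fun (st : Int × List Nat) i =>
            if row.getD i 0 = 0 then (st.1, st.2 ++ [i])
            else if i ∈ st.2 then st
            else (st.1 + row.getD i 0, st.2))
          st)
      (s, h)).1
      = s + ((List.range W).map (fun j => pvColWalkH j h rows)).sum := by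
  induction rows generalizing s h with
  | nil => simp [pvColWalkH, pvColWalk]
  | cons r rs ih =>
    rw [List.foldl_cons, pv_inner r r.length le_rfl s h]
    rw [ih (fun x hx => hW x (List.mem_cons_of_mem r hx))]
    have hrW : r.length ≤ W := hW r List.mem_cons_self
    have : ((List.range W).map (fun j => pvColWalkH j h (r :: rs))).sum
        = ((List.range W).map (pvCell r h)).sum
          + ((List.range W).map (fun j => pvColWalkH j (h ++ pvZIdx r r.length) rs)).sum := by
      rw [← pv_sum_map_add]
      congr 1
      exact List.map_congr_left (fun j _ => pv_col_step j h r rs)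
    rw [this, pv_cell_pad r h W hrW]
    ring

theorem pv_width_le (rows : List (List Int)) (a : Nat) :
    (a ≤ rows.foldl (fun w r => max w r.length) a) ∧
    (∀ r ∈ rows, r.length ≤ rows.foldl (fun w r => max w r.length) a) := by
  induction rows generalizing a with
  | nil => simp
  | cons x xs ih =>
    refine ⟨le_trans (le_max_left a x.length) (ih (max a x.length)).1, ?_⟩
    intro r hr
    rcases List.mem_cons.mp hr with rfl | hr
    · exact le_trans (le_max_right a r.length) (ih (max a r.length)).1
    · exact (ih (max a x.length)).2 r hr

-- ===== VERDICT (by name: the statement is the Claim_ definition above) =====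
theorem matrixElementsSum_spec : Claim_equal_matrixElementsSum := by
  intro matrix _
  unfold Spec_matrixElementsSum matrixElementsSum matrixElementsSum_alt
  rw [pv_outer matrix (matrix.foldl (fun w r => max w r.length) 0)
        (fun r hr => (pv_width_le matrix 0).2 r hr) 0 []]
  rw [pv_foldl_add (fun j => pvColWalk j matrix)]
  simp [pvColWalkH]
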